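-- pv_equiv track=rewrite | github.com/joshuapuusaari/Selection-Sort-Visualizer | app.py | generateArrows
-- ===== SOURCE A (Python) =====
-- def find_max_gap(listopher):
--         maxGap = 2
--         for z in listopher:
--                 if len(z)+1 > maxGap:
--                         maxGap = len(z)+1
--         return maxGap
--
-- def generateArrows(i, min, listopher):
--         contents = [str(i) for i in listopher]
--         maxGap = find_max_gap(contents)
--         output = ""
--         for z in range(len(contents)):
--                 if z==i or z==min: # Add spaces and an arrow if at target index
--                         output += (" "*(maxGap-1)) + "↑"
--                 else: # Otherwise just fill gap entirely with spaces
--                         output += (" " * (maxGap))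
--         return output
-- ===== SOURCE B (Python) =====
-- def generateArrows(i, min, listopher):
--     # Gap-run construction: instead of rendering n per-element blocks, compute the
--     # at-most-two absolute arrow character positions and emit space runs between them.
--     maxGap = max((len(str(x)) + 1 for x in listopher), default=2)
--     total = maxGap * len(listopher)
--     positions = sorted({(idx + 1) * maxGap - 1
--                         for idx in (i, min) if 0 <= idx < len(listopher)})
--     parts = []
--     prev = 0
--     for p in positions:
--         parts.append(" " * (p - prev))
--         parts.append("\u2191")
--         prev = p + 1
--     parts.append(" " * (total - prev))
--     return "".join(parts)
-- ===== Notes on version B (the rewrite author's own statement) =====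
-- stated objective: alternative
-- what changed: A renders the display cell by cell, branching per index while concatenating; B computes the (at most two) absolute arrow character positions directly and assembles the string from the space runs between them, so the per-element rendering loop disappears and the output is joined from at most five pieces.
import Mathlib
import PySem

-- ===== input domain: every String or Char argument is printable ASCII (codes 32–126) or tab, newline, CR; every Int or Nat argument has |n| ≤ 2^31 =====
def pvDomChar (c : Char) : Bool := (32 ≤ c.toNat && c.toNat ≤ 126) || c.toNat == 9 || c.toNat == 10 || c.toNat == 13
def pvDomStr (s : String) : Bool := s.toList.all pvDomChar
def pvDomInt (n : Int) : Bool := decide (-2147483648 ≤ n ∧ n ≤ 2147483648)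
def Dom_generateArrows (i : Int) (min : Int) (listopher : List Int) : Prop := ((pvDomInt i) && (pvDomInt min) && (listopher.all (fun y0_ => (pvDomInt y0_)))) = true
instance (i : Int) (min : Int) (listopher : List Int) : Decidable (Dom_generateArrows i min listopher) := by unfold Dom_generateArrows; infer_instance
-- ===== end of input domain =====

-- B replaces A's per-element left-to-right block rendering by a gap-run construction:
-- it computes the (at most two) absolute arrow character positions and emits the space
-- runs between them, so the output is assembled from at most five pieces.

-- ===== PORT A =====
def findMaxGap (contents : List String) : Nat :=
  contents.foldl (fun maxGap z => if z.toList.length + 1 > maxGap then z.toList.length + 1 else maxGap) 2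

def generateArrows (i : Int) (min : Int) (listopher : List Int) : String :=
  let contents := listopher.map PySem.Int.toStr
  let maxGap := findMaxGap contents
  let output := (PySem.List.pyRange 0 (contents.length : Int) 1).foldl
    (fun output z =>
      if z = i ∨ z = min then output ++ (List.replicate (maxGap - 1) ' ' ++ ['↑'])
      else output ++ List.replicate maxGap ' ') ([] : List Char)
  String.mk output

-- ===== PORT B =====
def generateArrows_alt (i : Int) (min : Int) (listopher : List Int) : String :=
  -- max(widths, default=2); widths are Nats (string lengths + 1)
  let maxGap : Nat :=
    match listopher.map (fun x => (PySem.Int.toStr x).toList.length + 1) with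
    | [] => 2
    | h :: t => t.foldl max h
  let total : Nat := maxGap * listopher.length
  -- sorted({(idx+1)*maxGap - 1 for idx in (i, min) if 0 <= idx < len(listopher)})
  let positions : List Int :=
    PySem.List.sorted
      (PySem.Set.ofList
        (([i, min].filter (fun idx => decide (0 ≤ idx ∧ idx < (listopher.length : Int)))).map
          (fun idx => (idx + 1) * (Int.ofNat maxGap) - 1)))
      (fun x => x) false
  -- emit " "*(p-prev) + "↑" per arrow position, then the trailing spaces
  let st := positions.foldl
    (fun (st : List Char × Int) p =>
      (st.1 ++ List.replicate (p - st.2).toNat ' ' ++ ['↑'], p + 1))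
    (([] : List Char), (0 : Int))
  String.mk (st.1 ++ List.replicate ((total : Int) - st.2).toNat ' ')

-- ===== PRECONDITION & SPEC =====
def Spec_generateArrows (i : Int) (min : Int) (listopher : List Int) (out : String) : Prop := out = generateArrows_alt i min listopher
instance (i : Int) (min : Int) (listopher : List Int) (out : String) : Decidable (Spec_generateArrows i min listopher out) := by unfold Spec_generateArrows; infer_instance

-- ===== CLAIM =====
def Claim_equal_generateArrows : Prop := ∀ (i : Int) (min : Int) (listopher : List Int), Dom_generateArrows i min listopher → Spec_generateArrows i min listopher (generateArrows i min listopher)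

-- ===== LEMMAS AND PROOFS =====

/-- One cell of the display: `g-1` spaces + arrow, or `g` spaces. -/
def pvBlock (g : Nat) (b : Bool) : List Char :=
  if b then List.replicate (g - 1) ' ' ++ ['↑'] else List.replicate g ' '

/-- Concatenation of cells driven by a list of flags. -/
def pvRows (g : Nat) : List Bool → List Char
  | [] => []
  | b :: bs => pvBlock g b ++ pvRows g bs

theorem pvBlock_true (g : Nat) : pvBlock g true = List.replicate (g - 1) ' ' ++ ['↑'] := by
  simp [pvBlock]

theorem pvRows_append (g : Nat) (a b : List Bool) :
    pvRows g (a ++ b) = pvRows g a ++ pvRows g b := by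
  induction a with
  | nil => simp [pvRows]
  | cons x t ih => simp [pvRows, ih]

theorem pvRows_replicate {g : Nat} (n : Nat) :
    pvRows g (List.replicate n false) = List.replicate (g * n) ' ' := by
  induction n with
  | zero => simp [pvRows]
  | succ n ih =>
      have h : g * (n + 1) = g + g * n := by ring
      rw [List.replicate_succ, pvRows, ih, h, List.replicate_add]
      simp [pvBlock]

/-- Splitting a single `set k true` on an all-false list. -/
theorem pvSplit1 : ∀ (n k : Nat), k < n →
    (List.replicate n false).set k true
      = List.replicate k false ++ true :: List.replicate (n - k - 1) false := by
  intro n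
  induction n with
  | zero => intro k hk; omega
  | succ n ih =>
      intro k hk
      cases k with
      | zero => simp [List.replicate_succ]
      | succ k =>
          rw [List.replicate_succ, List.set_cons_succ, ih k (by omega)]
          simp [List.replicate_succ]

theorem pvFoldl_ite_max {α : Type} (f : α → Nat) :
    ∀ (L : List α) (m : Nat),
      L.foldl (fun m z => if f z > m then f z else m) m = (L.map f).foldl max m := by
  intro L
  induction L with
  | nil => intro m; rfl
  | cons z t ih =>
      intro m
      simp only [List.foldl_cons, List.map_cons]
      have h : (if f z > m then f z else m) = max m (f z) := by
        by_cases hlt : f z > m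
        · rw [if_pos hlt, max_eq_right (le_of_lt hlt)]
        · rw [if_neg hlt, max_eq_left (by omega)]
      rw [h, ih]

theorem pvToDigitsCore_len (b : Nat) : ∀ (f n : Nat) (ds : List Char),
    ds.length ≤ (Nat.toDigitsCore b f n ds).length := by
  intro f
  induction f with
  | zero => intro n ds; simp [Nat.toDigitsCore]
  | succ f ih =>
      intro n ds
      rw [Nat.toDigitsCore]
      by_cases h : n / b = 0
      · simp [h]
      · rw [if_neg h]
        exact le_trans (by simp) (ih _ _)

/-- `str(x)` is never empty, so A's widths are always ≥ 2. -/
theorem pvWidth_ge_two (x : Int) : 2 ≤ (PySem.Int.toStr x).toList.length + 1 := by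
  have h : 1 ≤ (PySem.Int.toChars x).length := by
    unfold PySem.Int.toChars
    by_cases hx : x < 0
    · simp [hx]
    · rw [if_neg hx]
      unfold Nat.toDigits
      rw [Nat.toDigitsCore]
      by_cases h0 : x.toNat / 10 = 0
      · simp [h0]
      · rw [if_neg h0]
        exact le_trans (by simp) (pvToDigitsCore_len 10 _ _ _)
  rw [PySem.Int.toList_toStr]
  omega

/-- A's running-max loop equals Python's `max(widths, default=2)`, since widths ≥ 2. -/
theorem pvMaxGap_eq (listopher : List Int) :
    (match listopher.map (fun x => (PySem.Int.toStr x).toList.length + 1) with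
      | [] => 2
      | h :: t => t.foldl max h)
      = findMaxGap (listopher.map PySem.Int.toStr) := by
  have h1 : findMaxGap (listopher.map PySem.Int.toStr)
      = ((listopher.map PySem.Int.toStr).map (fun z => z.toList.length + 1)).foldl max 2 := by
    unfold findMaxGap
    exact pvFoldl_ite_max (fun (z : String) => z.toList.length + 1) _ 2
  have h2 : (listopher.map PySem.Int.toStr).map (fun z => z.toList.length + 1)
      = listopher.map (fun x => (PySem.Int.toStr x).toList.length + 1) := by
    rw [List.map_map]; rfl
  rw [h1, h2]
  cases hL : listopher with
  | nil => simp
  | cons y ys =>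
      simp only [List.map_cons, List.foldl_cons]
      have hy : 2 ≤ (PySem.Int.toStr y).toList.length + 1 := pvWidth_ge_two y
      rw [max_eq_right hy]

theorem pvTwo_le_findMaxGap (listopher : List Int) :
    2 ≤ findMaxGap (listopher.map PySem.Int.toStr) := by
  unfold findMaxGap
  rw [pvFoldl_ite_max (fun (z : String) => z.toList.length + 1)]
  have : ∀ (t : List Nat) (m : Nat), m ≤ t.foldl max m := by
    intro t
    induction t with
    | nil => intro m; exact le_refl m
    | cons c t ih => intro m; exact le_trans (Nat.le_max_left m c) (ih _)
  exact this _ 2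

/-- A's concatenation loop builds `pvRows` of the flag list. -/
theorem pvFoldA (g : Nat) (i min : Int) :
    ∀ (zs : List Int) (acc : List Char),
      zs.foldl (fun output z =>
        if z = i ∨ z = min then output ++ (List.replicate (g - 1) ' ' ++ ['↑'])
        else output ++ List.replicate g ' ') acc
      = acc ++ pvRows g (zs.map (fun z => decide (z = i ∨ z = min))) := by
  intro zs
  induction zs with
  | nil => intro acc; simp [pvRows]
  | cons z t ih =>
      intro acc
      by_cases h : z = i ∨ z = min <;>
        simp [h, ih, pvRows, pvBlock, List.append_assoc]

/-- The flag lists agree: A's per-slot test equals two conditional writes. -/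
theorem pvFlags_eq (i min : Int) (n : Nat) :
    (PySem.List.pyRange 0 (n : Int) 1).map (fun z => decide (z = i ∨ z = min))
      = (if 0 ≤ min ∧ min < (n : Int)
          then (if 0 ≤ i ∧ i < (n : Int)
                 then (List.replicate n false).set i.toNat true
                 else List.replicate n false).set min.toNat true
          else (if 0 ≤ i ∧ i < (n : Int)
                 then (List.replicate n false).set i.toNat true
                 else List.replicate n false)) := by
  apply List.ext_getElem
  · by_cases hm : 0 ≤ min ∧ min < (n : Int) <;> by_cases hi : 0 ≤ i ∧ i < (n : Int) <;>
      simp [hm, hi, PySem.List.length_pyRange_one]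
  · intro k h1 h2
    have hk : k < n := by
      simp [PySem.List.length_pyRange_one] at h1
      omega
    rw [List.getElem_map]
    have hg : (PySem.List.pyRange 0 (n : Int) 1)[k]'(by
        simpa [PySem.List.length_pyRange_one] using h1) = (k : Int) := by
      rw [PySem.List.getElem_pyRange_one]
      ring
    rw [hg]
    by_cases hm : 0 ≤ min ∧ min < (n : Int) <;> by_cases hi : 0 ≤ i ∧ i < (n : Int)
    · simp only [if_pos hm, if_pos hi] at h2 ⊢
      simp only [List.getElem_set, List.getElem_replicate]
      by_cases hkm : (k : Int) = min
      · rw [if_pos (by omega : min.toNat = k)]; simp [hkm]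
      · rw [if_neg (by omega : ¬ min.toNat = k)]
        by_cases hki : (k : Int) = i
        · rw [if_pos (by omega : i.toNat = k)]; simp [hki]
        · rw [if_neg (by omega : ¬ i.toNat = k)]; simp [hki, hkm]
    · simp only [if_pos hm, if_neg hi] at h2 ⊢
      simp only [List.getElem_set, List.getElem_replicate]
      have hki : ¬ (k : Int) = i := by omega
      by_cases hkm : (k : Int) = min
      · rw [if_pos (by omega : min.toNat = k)]; simp [hkm]
      · rw [if_neg (by omega : ¬ min.toNat = k)]; simp [hki, hkm]
    · simp only [if_neg hm, if_pos hi] at h2 ⊢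
      simp only [List.getElem_set, List.getElem_replicate]
      have hkm : ¬ (k : Int) = min := by omega
      by_cases hki : (k : Int) = i
      · rw [if_pos (by omega : i.toNat = k)]; simp [hki]
      · rw [if_neg (by omega : ¬ i.toNat = k)]; simp [hki, hkm]
    · simp only [if_neg hm, if_neg hi] at h2 ⊢
      have hki : ¬ (k : Int) = i := by omega
      have hkm : ¬ (k : Int) = min := by omega
      simp [hki, hkm]

/-- One arrow at cell `k`: rows in "gap-run" form. -/
theorem pvOneArrow (g n k : Nat) (hk : k < n) :
    pvRows g ((List.replicate n false).set k true)
      = List.replicate (k * g + (g - 1)) ' '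
          ++ '↑' :: List.replicate ((n - k - 1) * g) ' ' := by
  rw [pvSplit1 n k hk, pvRows_append, pvRows_replicate]
  show _ ++ (pvBlock g true ++ pvRows g _) = _
  rw [pvRows_replicate, pvBlock_true]
  rw [show g * k = k * g by ring, show g * (n - k - 1) = (n - k - 1) * g by ring]
  simp only [← List.append_assoc, ← List.replicate_add]
  simp [List.append_assoc]

/-- Two arrows at cells `k < l`: rows in "gap-run" form. -/
theorem pvTwoArrow (g n k l : Nat) (hkl : k < l) (hl : l < n) :
    pvRows g (((List.replicate n false).set k true).set l true)
      = List.replicate (k * g + (g - 1)) ' '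
          ++ '↑' :: (List.replicate ((l - k - 1) * g + (g - 1)) ' '
          ++ '↑' :: List.replicate ((n - l - 1) * g) ' ') := by
  rw [pvSplit1 n k (by omega)]
  have hsplit : (List.replicate k false ++ true :: List.replicate (n - k - 1) false).set l true
      = List.replicate k false
          ++ true :: ((List.replicate (n - k - 1) false).set (l - k - 1) true) := by
    rw [List.set_append]
    rw [if_neg (by simp; omega)]
    have : l - List.length (List.replicate k (false : Bool)) = (l - k - 1) + 1 := by
      simp; omega
    rw [this, List.set_cons_succ]
  rw [hsplit, pvSplit1 (n - k - 1) (l - k - 1) (by omega)]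
  rw [pvRows_append, pvRows_replicate]
  show _ ++ (pvBlock g true ++ pvRows g _) = _
  rw [pvRows_append, pvRows_replicate]
  show _ ++ (_ ++ (_ ++ (pvBlock g true ++ pvRows g _))) = _
  rw [pvRows_replicate, pvBlock_true]
  have e1 : g * k = k * g := by ring
  have e2 : g * (l - k - 1) = (l - k - 1) * g := by ring
  have e3 : n - k - 1 - (l - k - 1) - 1 = n - l - 1 := by omega
  have e4 : g * (n - l - 1) = (n - l - 1) * g := by ring
  rw [e1, e2, e3, e4]
  simp only [← List.append_assoc, ← List.replicate_add]
  simp [List.append_assoc]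

/-- `sorted([a])` over the identity key. -/
theorem pvSorted_single (a : Int) :
    PySem.List.sorted [a] (fun x => x) false = [a] := by
  apply PySem.List.sorted_eq_of_perm_of_pairwise_lt
  · exact List.Perm.refl _
  · simp

/-- `sorted([a,b])` for `a < b`. -/
theorem pvSorted_pair {a b : Int} (h : a < b) :
    PySem.List.sorted [a, b] (fun x => x) false = [a, b] := by
  apply PySem.List.sorted_eq_of_perm_of_pairwise_lt
  · exact List.Perm.refl _
  · simp [h]

/-- `sorted([b,a])` for `a < b`. -/
theorem pvSorted_pair_swap {a b : Int} (h : a < b) :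
    PySem.List.sorted [b, a] (fun x => x) false = [a, b] := by
  apply PySem.List.sorted_eq_of_perm_of_pairwise_lt
  · exact List.Perm.swap _ _ _
  · simp [h]

/-- Cast arithmetic for the trailing space run. -/
theorem pvCastTail (gp n k : Nat) (h : k < n) :
    (((gp + 1) * n : Nat) : Int) - (((k * (gp + 1) + gp : Nat) : Int) + 1)
      = (((n - k - 1) * (gp + 1) : Nat) : Int) := by
  obtain ⟨m, rfl⟩ : ∃ m, n = k + 1 + m := ⟨n - k - 1, by omega⟩
  rw [show k + 1 + m - k - 1 = m from by omega]
  push_cast; ring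

/-- Cast arithmetic for the space run between the two arrows. -/
theorem pvCastMid (gp ki km : Nat) (h : ki < km) :
    ((km * (gp + 1) + gp : Nat) : Int) - (((ki * (gp + 1) + gp : Nat) : Int) + 1)
      = (((km - ki - 1) * (gp + 1) + gp : Nat) : Int) := by
  obtain ⟨m, rfl⟩ : ∃ m, km = ki + 1 + m := ⟨km - ki - 1, by omega⟩
  rw [show ki + 1 + m - ki - 1 = m from by omega]
  push_cast; ring

-- ===== VERDICT =====
theorem generateArrows_spec : Claim_equal_generateArrows := by
  intro i min listopher _
  unfold Spec_generateArrows generateArrows generateArrows_alt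
  simp only [List.length_map]
  set g := findMaxGap (listopher.map PySem.Int.toStr) with hgdef
  have hg2 : 2 ≤ g := pvTwo_le_findMaxGap listopher
  rw [pvMaxGap_eq listopher, ← hgdef]
  set n := listopher.length with hndef
  rw [pvFoldA g i min _ [], List.nil_append, pvFlags_eq i min n]
  simp only [Int.ofNat_eq_natCast]
  clear hgdef
  clear_value g
  obtain ⟨g', rfl⟩ : ∃ g', g = g' + 1 := ⟨g - 1, by omega⟩
  set g := g' + 1 with hgg
  by_cases hi : 0 ≤ i ∧ i < (n : Int) <;> by_cases hm : 0 ≤ min ∧ min < (n : Int)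
  · -- both valid
    rw [if_pos hi, if_pos hm]
    rw [show ([i, min].filter fun idx => decide (0 ≤ idx ∧ idx < ((n : Nat) : Int))) = [i, min] from by
      simp [hi, hm]]
    by_cases heq : i = min
    · -- same index: one arrow
      subst heq
      rw [List.set_set]
      set k := i.toNat with hkdef
      have hk : k < n := by omega
      have hp : ((i + 1) * ((g : Nat) : Int) - 1) = ((k * g + g' : Nat) : Int) := by
        push_cast
        have : i = (k : Int) := by omega
        rw [this, hgg]; push_cast; ring
      simp only [List.map_cons, List.map_nil, hp]
      rw [show PySem.Set.ofList [((k * g + g' : Nat) : Int), ((k * g + g' : Nat) : Int)]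
            = [((k * g + g' : Nat) : Int)] by
        simp [PySem.Set.ofList, PySem.Set.add, PySem.Set.contains]]
      rw [pvSorted_single]
      simp only [List.foldl_cons, List.foldl_nil, Int.sub_zero, List.nil_append]
      rw [pvOneArrow g n k hk]
      have h1 : (((k * g + g' : Nat) : Int)).toNat = k * g + g' := Int.toNat_natCast _
      have h2 : (((g * n : Nat) : Int) - (((k * g + g' : Nat) : Int) + 1)).toNat
          = (n - k - 1) * g := by
        rw [hgg, pvCastTail g' n k (by omega), Int.toNat_natCast]
      rw [h1, h2, show g - 1 = g' from by omega]
      simp [List.append_assoc]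
    · -- two distinct arrows
      set ki := i.toNat with hkidef
      set km := min.toNat with hkmdef
      have hkim : ki ≠ km := fun h => heq (by omega)
      have hpi : ((i + 1) * ((g : Nat) : Int) - 1) = ((ki * g + g' : Nat) : Int) := by
        push_cast
        have : i = (ki : Int) := by omega
        rw [this, hgg]; push_cast; ring
      have hpm : ((min + 1) * ((g : Nat) : Int) - 1) = ((km * g + g' : Nat) : Int) := by
        push_cast
        have : min = (km : Int) := by omega
        rw [this, hgg]; push_cast; ring
      simp only [List.map_cons, List.map_nil, hpi, hpm]
      rw [show PySem.Set.ofList [((ki * g + g' : Nat) : Int), ((km * g + g' : Nat) : Int)]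
            = [((ki * g + g' : Nat) : Int), ((km * g + g' : Nat) : Int)] by
        simp [PySem.Set.ofList, PySem.Set.add, PySem.Set.contains, Ne.symm hkim]]
      rcases lt_or_gt_of_ne hkim with hlt | hlt
      · -- ki < km : flags already ordered after set_comm
        have hord : ((ki * g + g' : Nat) : Int) < ((km * g + g' : Nat) : Int) := by
          have : ki * g + g' < km * g + g' := by nlinarith
          exact_mod_cast this
        rw [pvSorted_pair hord]
        simp only [List.foldl_cons, List.foldl_nil, Int.sub_zero, List.nil_append]
        rw [pvTwoArrow g n ki km hlt (by omega)]
        have h1 : (((ki * g + g' : Nat) : Int)).toNat = ki * g + g' := Int.toNat_natCast _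
        have h2 : (((km * g + g' : Nat) : Int) - (((ki * g + g' : Nat) : Int) + 1)).toNat
            = (km - ki - 1) * g + g' := by
          rw [hgg, pvCastMid g' ki km (by omega), Int.toNat_natCast]
        have h3 : (((g * n : Nat) : Int) - (((km * g + g' : Nat) : Int) + 1)).toNat
            = (n - km - 1) * g := by
          rw [hgg, pvCastTail g' n km (by omega), Int.toNat_natCast]
        rw [h1, h2, h3, show g - 1 = g' from by omega]
        simp [List.append_assoc]
      · -- km < ki
        have hord : ((km * g + g' : Nat) : Int) < ((ki * g + g' : Nat) : Int) := by
          have : km * g + g' < ki * g + g' := by nlinarith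
          exact_mod_cast this
        rw [pvSorted_pair_swap hord]
        simp only [List.foldl_cons, List.foldl_nil, Int.sub_zero, List.nil_append]
        rw [List.set_comm _ _ (show ki ≠ km from by omega)]
        rw [pvTwoArrow g n km ki hlt (by omega)]
        have h1 : (((km * g + g' : Nat) : Int)).toNat = km * g + g' := Int.toNat_natCast _
        have h2 : (((ki * g + g' : Nat) : Int) - (((km * g + g' : Nat) : Int) + 1)).toNat
            = (ki - km - 1) * g + g' := by
          rw [hgg, pvCastMid g' km ki (by omega), Int.toNat_natCast]
        have h3 : (((g * n : Nat) : Int) - (((ki * g + g' : Nat) : Int) + 1)).toNat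
            = (n - ki - 1) * g := by
          rw [hgg, pvCastTail g' n ki (by omega), Int.toNat_natCast]
        rw [h1, h2, h3, show g - 1 = g' from by omega]
        simp [List.append_assoc]
  · -- only i valid
    rw [if_pos hi, if_neg hm]
    rw [show ([i, min].filter fun idx => decide (0 ≤ idx ∧ idx < ((n : Nat) : Int))) = [i] from by
      simp [hi, hm]]
    set k := i.toNat with hkdef
    have hk : k < n := by omega
    have hp : ((i + 1) * ((g : Nat) : Int) - 1) = ((k * g + g' : Nat) : Int) := by
      push_cast
      have : i = (k : Int) := by omega
      rw [this, hgg]; push_cast; ring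
    simp only [List.map_cons, List.map_nil, hp]
    rw [show PySem.Set.ofList [((k * g + g' : Nat) : Int)] = [((k * g + g' : Nat) : Int)] by
      simp [PySem.Set.ofList, PySem.Set.add, PySem.Set.contains]]
    rw [pvSorted_single]
    simp only [List.foldl_cons, List.foldl_nil, Int.sub_zero, List.nil_append]
    rw [pvOneArrow g n k hk]
    have h1 : (((k * g + g' : Nat) : Int)).toNat = k * g + g' := Int.toNat_natCast _
    have h2 : (((g * n : Nat) : Int) - (((k * g + g' : Nat) : Int) + 1)).toNat
        = (n - k - 1) * g := by
      rw [hgg, pvCastTail g' n k (by omega), Int.toNat_natCast]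
    rw [h1, h2, show g - 1 = g' from by omega]
    simp [List.append_assoc]
  · -- only min valid
    rw [if_neg hi, if_pos hm]
    rw [show ([i, min].filter fun idx => decide (0 ≤ idx ∧ idx < ((n : Nat) : Int))) = [min] from by
      simp [hi, hm]]
    set k := min.toNat with hkdef
    have hk : k < n := by omega
    have hp : ((min + 1) * ((g : Nat) : Int) - 1) = ((k * g + g' : Nat) : Int) := by
      push_cast
      have : min = (k : Int) := by omega
      rw [this, hgg]; push_cast; ring
    simp only [List.map_cons, List.map_nil, hp]
    rw [show PySem.Set.ofList [((k * g + g' : Nat) : Int)] = [((k * g + g' : Nat) : Int)] by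
      simp [PySem.Set.ofList, PySem.Set.add, PySem.Set.contains]]
    rw [pvSorted_single]
    simp only [List.foldl_cons, List.foldl_nil, Int.sub_zero, List.nil_append]
    rw [pvOneArrow g n k hk]
    have h1 : (((k * g + g' : Nat) : Int)).toNat = k * g + g' := Int.toNat_natCast _
    have h2 : (((g * n : Nat) : Int) - (((k * g + g' : Nat) : Int) + 1)).toNat
        = (n - k - 1) * g := by
      rw [hgg, pvCastTail g' n k (by omega), Int.toNat_natCast]
    rw [h1, h2, show g - 1 = g' from by omega]
    simp [List.append_assoc]
  · -- neither valid
    rw [if_neg hi, if_neg hm]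
    rw [show ([i, min].filter fun idx => decide (0 ≤ idx ∧ idx < ((n : Nat) : Int))) = [] from by
      simp [hi, hm]]
    simp only [List.map_nil]
    rw [show PySem.Set.ofList ([] : List Int) = [] by rfl]
    rw [show PySem.List.sorted ([] : List Int) (fun x => x) false = [] by rfl]
    simp only [List.foldl_nil, Int.sub_zero, List.nil_append]
    rw [pvRows_replicate]
    have : (((g * n : Nat) : Int)).toNat = g * n := Int.toNat_natCast _
    rw [this]
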